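-- pv_equiv track=rewrite | github.com/DraftTin/AprioriAlgorithm | main.py | findItemForPlagiarisms
-- ===== SOURCE A (Python) =====
-- def findItemForPlagiarisms(rItems):
--     items = set()
--     maxLen = 0
--     for item in rItems:
--         maxLen = max(maxLen, len(item[0]))
--     for item in rItems:
--         if len(item[0]) == maxLen:
--             items.add(item[0])
--     return items
-- ===== SOURCE B (Python) =====
-- def findItemForPlagiarisms(rItems):
--     items = set()
--     maxLen = 0
--     for item in rItems:
--         L = len(item[0])
--         if L > maxLen:
--             maxLen = L
--             items = {item[0]}
--         elif L == maxLen: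
--             items.add(item[0])
--     return items
-- ===== Notes on version B (the rewrite author's own statement) =====
-- stated objective: simpler
-- what changed: Replaces A's two passes (one to find the maximal key length, one to collect keys of that length) by a single pass keeping a best-so-far (maxLen, items) state that is reset when a longer key appears.
import Mathlib
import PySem

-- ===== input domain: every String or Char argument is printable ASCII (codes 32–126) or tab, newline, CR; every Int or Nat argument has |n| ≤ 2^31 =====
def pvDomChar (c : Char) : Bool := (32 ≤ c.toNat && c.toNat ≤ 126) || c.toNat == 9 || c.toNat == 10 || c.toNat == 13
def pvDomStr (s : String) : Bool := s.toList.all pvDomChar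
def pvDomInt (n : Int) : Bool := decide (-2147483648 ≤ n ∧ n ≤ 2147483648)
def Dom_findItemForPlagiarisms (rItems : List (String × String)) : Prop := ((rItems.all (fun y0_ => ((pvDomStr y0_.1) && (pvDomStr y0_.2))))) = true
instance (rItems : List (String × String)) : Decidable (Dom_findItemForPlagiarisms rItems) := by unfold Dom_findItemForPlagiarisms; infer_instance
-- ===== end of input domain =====

-- B replaces A's two passes (max length, then collect) by one pass with a best-so-far (maxLen, items) state; same cost, simpler single loop.


-- ===== PORT A =====
-- first loop: maxLen = max(maxLen, len(item[0])) over rItems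
def pvMaxLoop (m : Int) (l : List (String × String)) : Int :=
  l.foldl (fun m it => max m (PySem.Str.len it.1)) m
-- second loop: items.add(item[0]) whenever len(item[0]) == maxLen
def pvCollect (M : Int) (l : List (String × String)) (s : PySem.Set String) : PySem.Set String :=
  l.foldl (fun s it => if PySem.Str.len it.1 = M then PySem.Set.add s it.1 else s) s

def findItemForPlagiarisms (rItems : List (String × String)) : List String :=
  pvCollect (pvMaxLoop 0 rItems) rItems PySem.Set.empty

-- ===== PORT B =====
-- one loop body: reset the set on a strictly longer key, add on an equally long key
def pvBStep (st : Int × PySem.Set String) (it : String × String) : Int × PySem.Set String :=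
  let L := PySem.Str.len it.1
  if st.1 < L then (L, PySem.Set.ofList [it.1])
  else if L = st.1 then (st.1, PySem.Set.add st.2 it.1)
  else st

def findItemForPlagiarisms_alt (rItems : List (String × String)) : List String :=
  (rItems.foldl pvBStep (0, PySem.Set.empty)).2

-- ===== PRECONDITION & SPEC =====
def Spec_findItemForPlagiarisms (rItems : List (String × String)) (out : List String) : Prop := out = findItemForPlagiarisms_alt rItems
instance (rItems : List (String × String)) (out : List String) : Decidable (Spec_findItemForPlagiarisms rItems out) := by unfold Spec_findItemForPlagiarisms; infer_instance

-- ===== CLAIM (what is proved, stated in full; the proofs are below) =====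
def Claim_equal_findItemForPlagiarisms : Prop := ∀ (rItems : List (String × String)), Dom_findItemForPlagiarisms rItems → Spec_findItemForPlagiarisms rItems (findItemForPlagiarisms rItems)

-- ===== LEMMAS AND PROOFS =====

lemma pvMaxLoop_cons (m : Int) (it : String × String) (t : List (String × String)) :
    pvMaxLoop m (it :: t) = pvMaxLoop (max m (PySem.Str.len it.1)) t := rfl

lemma pvCollect_cons (M : Int) (it : String × String) (t : List (String × String))
    (s : PySem.Set String) :
    pvCollect M (it :: t) s =
      pvCollect M t (if PySem.Str.len it.1 = M then PySem.Set.add s it.1 else s) := rfl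

lemma le_pvMaxLoop (m : Int) (l : List (String × String)) : m ≤ pvMaxLoop m l := by
  induction l generalizing m with
  | nil => simp [pvMaxLoop]
  | cons it t ih =>
      have := ih (max m (PySem.Str.len it.1))
      rw [pvMaxLoop_cons]
      exact le_trans (le_max_left _ _) this

-- the single-pass invariant: B's fold state equals (running max, A-style collection)
lemma bfold_eq (l : List (String × String)) : ∀ (m : Int) (s : PySem.Set String),
    l.foldl pvBStep (m, s) =
      (pvMaxLoop m l,
       if pvMaxLoop m l = m then pvCollect (pvMaxLoop m l) l s
       else pvCollect (pvMaxLoop m l) l PySem.Set.empty) := by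
  induction l with
  | nil =>
      intro m s
      rw [List.foldl_nil, show pvMaxLoop m [] = m from rfl, if_pos rfl]
      rfl
  | cons it t ih =>
      intro m s
      rcases lt_trichotomy m (PySem.Str.len it.1) with h | h | h
      · -- the key is strictly longer: B resets its set
        have hstep : pvBStep (m, s) it =
            (PySem.Str.len it.1, PySem.Set.add PySem.Set.empty it.1) := by
          simp only [pvBStep]; rw [if_pos h]; rfl
        have hM : PySem.Str.len it.1 ≤ pvMaxLoop (PySem.Str.len it.1) t := le_pvMaxLoop _ _
        have hMne : pvMaxLoop (PySem.Str.len it.1) t ≠ m := by omega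
        rw [List.foldl_cons, hstep, ih, pvMaxLoop_cons, max_eq_right h.le, if_neg hMne]
        by_cases hc : pvMaxLoop (PySem.Str.len it.1) t = PySem.Str.len it.1
        · rw [if_pos hc, pvCollect_cons, if_pos hc.symm]
        · rw [if_neg hc, pvCollect_cons, if_neg (fun e => hc e.symm)]
      · -- equally long: B adds to its set, exactly as A's second loop does
        have hstep : pvBStep (m, s) it = (m, PySem.Set.add s it.1) := by
          simp only [pvBStep]
          rw [if_neg (show ¬ m < PySem.Str.len it.1 by omega), if_pos h.symm]
        rw [List.foldl_cons, hstep, ih, pvMaxLoop_cons, ← h, max_self]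
        by_cases hc : pvMaxLoop m t = m
        · rw [if_pos hc, if_pos hc, pvCollect_cons,
            if_pos (show PySem.Str.len it.1 = pvMaxLoop m t by rw [← h]; exact hc.symm)]
        · rw [if_neg hc, if_neg hc, pvCollect_cons,
            if_neg (show ¬ PySem.Str.len it.1 = pvMaxLoop m t by rw [← h]; exact fun e => hc e.symm)]
      · -- strictly shorter: B's state is unchanged, A's second loop skips it too
        have hstep : pvBStep (m, s) it = (m, s) := by
          simp only [pvBStep]; rw [if_neg (not_lt.2 h.le), if_neg h.ne]
        have hM : m ≤ pvMaxLoop m t := le_pvMaxLoop m t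
        have hne : PySem.Str.len it.1 ≠ pvMaxLoop m t := by omega
        rw [List.foldl_cons, hstep, ih, pvMaxLoop_cons, max_eq_left h.le]
        by_cases hc : pvMaxLoop m t = m
        · rw [if_pos hc, if_pos hc, pvCollect_cons, if_neg hne]
        · rw [if_neg hc, if_neg hc, pvCollect_cons, if_neg hne]

-- ===== VERDICT (by name: the statement is the Claim_ definition above) =====
theorem findItemForPlagiarisms_spec : Claim_equal_findItemForPlagiarisms := by
  intro rItems _
  unfold Spec_findItemForPlagiarisms findItemForPlagiarisms findItemForPlagiarisms_alt
  rw [bfold_eq]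
  by_cases hc : pvMaxLoop 0 rItems = 0
  · rw [if_pos hc]
  · rw [if_neg hc]
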